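-- pv_equiv track=rewrite | github.com/Ultraviolet-Ninja/MyCompProgExperience | src/competition/kattis/the_class/lab4/terraces.py | get_terraces
-- ===== SOURCE A (Python) =====
-- from collections import deque
--
-- def in_grid(cell, x, y):
--     return 0 <= cell[0] < x and 0 <= cell[1] < y
--
-- def get_terrace(grid, x, y, cell, searched):
--     # perform a naive search starting on the given cell
--     terrace = set()
--     frontier = deque()
--     frontier.appendleft(cell)
--     searched.add(cell)
--     value = grid[cell[0]][cell[1]]  # only add cells to terrace that have this value
--     while len(frontier) > 0:
--         cell = frontier.pop()
--         terrace.add(cell)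
--         i = cell[0]
--         j = cell[1]
--         left = (i-1, j)
--         right = (i+1, j)
--         up = (i, j-1)
--         down = (i, j+1)
--         for neighbor in (left, right, up, down):
--             # add (valid) neighbor cell to terrace if it has the same value and isn't already part of another terrace
--             if in_grid(neighbor, x, y) and neighbor not in searched and value == grid[neighbor[0]][neighbor[1]]:
--                 searched.add(neighbor)
--                 frontier.appendleft(neighbor)
--     return terrace
--
-- def get_terraces(grid, x, y):
--     terraces = []
--     searched = set()
--     for i in range(x):
--         for j in range(y):
--             cell = (i, j)
--             # if cell is in searched, it already belongs to a terrace, so we skip it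
--             if cell not in searched:
--                 # do search on cell to construct terrace
--                 terrace = get_terrace(grid, x, y, cell, searched)
--                 terraces.append(terrace)
--
--     return terraces
-- ===== SOURCE B (Python) =====
-- def next_layer(grid, x, y, v, layer, seen):
--     # one synchronous expansion step: all not-yet-seen same-valued in-grid
--     # neighbours of the current frontier, in first-discovery order
--     cand = [n for a, b in layer for n in ((a - 1, b), (a + 1, b), (a, b - 1), (a, b + 1))]
--     nxt = [n for n in cand
--            if 0 <= n[0] < x and 0 <= n[1] < y and n not in seen and grid[n[0]][n[1]] == v]
--     nxt = list(dict.fromkeys(nxt))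
--     seen.update(nxt)
--     return nxt
--
-- def get_terraces(grid, x, y):
--     terraces = []
--     seen = set()
--     for i in range(x):
--         for j in range(y):
--             if (i, j) not in seen:
--                 seen.add((i, j))
--                 comp = [(i, j)]
--                 layer = [(i, j)]
--                 while layer:
--                     layer = next_layer(grid, x, y, grid[i][j], layer, seen)
--                     comp += layer
--                 terraces.append(set(comp))
--     return terraces
-- ===== Notes on version B (the rewrite author's own statement) =====
-- stated objective: alternative
-- what changed: Replaced the helper-based deque BFS (per-cell queue pops, incremental visited mutation and a separate terrace set) by level-synchronous frontier expansion: each next frontier is computed in one shot as a comprehension over the previous frontier, deduplicated with dict.fromkeys, and the seen set is bulk-updated once per level; the terrace is the concatenation of the levels. Pre_ only excludes grids smaller than x rows by y columns, on which A raises IndexError.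
import Mathlib
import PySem

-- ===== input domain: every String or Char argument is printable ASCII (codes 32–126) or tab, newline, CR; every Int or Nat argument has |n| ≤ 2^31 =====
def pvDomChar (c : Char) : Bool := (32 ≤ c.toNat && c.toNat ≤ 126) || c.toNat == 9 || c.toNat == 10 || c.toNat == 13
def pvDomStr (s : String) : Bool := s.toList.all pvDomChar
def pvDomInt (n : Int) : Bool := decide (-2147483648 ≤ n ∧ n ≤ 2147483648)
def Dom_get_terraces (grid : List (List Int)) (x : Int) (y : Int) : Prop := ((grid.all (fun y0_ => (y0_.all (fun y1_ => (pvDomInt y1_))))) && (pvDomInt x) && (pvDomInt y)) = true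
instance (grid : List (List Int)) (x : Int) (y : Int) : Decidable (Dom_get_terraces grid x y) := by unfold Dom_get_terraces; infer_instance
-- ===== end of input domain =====

-- B replaces A's per-cell deque BFS by level-synchronous frontier expansion (each next
-- frontier is one filtered pass over the previous one, deduplicated, with one bulk update of
-- the seen set); equal return values proved on Pre_. Objective: alternative, same complexity.

-- ===== PORT A =====
-- grid[i][j] (both Pythons index the same way; the defaults are unreachable under Pre_)
def pvAt (grid : List (List Int)) (i j : Int) : Int :=
  PySem.List.pyGetD (PySem.List.pyGetD grid i []) j 0

-- helper in_grid(cell, x, y)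
def in_grid (cell : Int × Int) (x y : Int) : Bool :=
  (decide (0 ≤ cell.1) && decide (cell.1 < x)) && (decide (0 ≤ cell.2) && decide (cell.2 < y))

-- the 'while len(frontier) > 0' loop of get_terrace; the deque as a list: appendleft = cons,
-- pop = take the last element.  Fuel only makes the loop total: each iteration dequeues a
-- distinct in-grid cell, so x*y+1 steps always suffice.
def pvGetTerraceGo (grid : List (List Int)) (x y value : Int) :
    Nat → List (Int × Int) → PySem.Set (Int × Int) → PySem.Set (Int × Int) →
    PySem.Set (Int × Int) × PySem.Set (Int × Int)
  | 0, _, terrace, searched => (terrace, searched)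
  | fuel + 1, frontier, terrace, searched =>
    match frontier.getLast? with
    | none => (terrace, searched)
    | some cell =>
      let frontier' := frontier.dropLast
      let terrace' := PySem.Set.add terrace cell
      let st := [(cell.1 - 1, cell.2), (cell.1 + 1, cell.2),
                 (cell.1, cell.2 - 1), (cell.1, cell.2 + 1)].foldl
        (fun (st : PySem.Set (Int × Int) × List (Int × Int)) nb =>
          if in_grid nb x y && !(PySem.Set.contains st.1 nb) && value == pvAt grid nb.1 nb.2
          then (PySem.Set.add st.1 nb, nb :: st.2)
          else st) (searched, frontier')
      pvGetTerraceGo grid x y value fuel st.2 terrace' st.1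

-- get_terrace(grid, x, y, cell, searched): Python mutates 'searched'; the port returns
-- (terrace, updated searched)
def pvGetTerrace (grid : List (List Int)) (x y : Int) (cell : Int × Int)
    (searched : PySem.Set (Int × Int)) : PySem.Set (Int × Int) × PySem.Set (Int × Int) :=
  let value := pvAt grid cell.1 cell.2
  pvGetTerraceGo grid x y value (x.toNat * y.toNat + 1) [cell] PySem.Set.empty
    (PySem.Set.add searched cell)

def get_terraces (grid : List (List Int)) (x : Int) (y : Int) : List (List (Int × Int)) :=
  ((PySem.List.pyRange 0 x 1).foldl (fun st i =>
    (PySem.List.pyRange 0 y 1).foldl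
      (fun (st : List (List (Int × Int)) × PySem.Set (Int × Int)) j =>
        if PySem.Set.contains st.2 (i, j) then st
        else
          let r := pvGetTerrace grid x y (i, j) st.2
          (st.1 ++ [r.1], r.2)) st)
    ([], PySem.Set.empty)).1

-- ===== PORT B =====
-- the four neighbour candidates of a cell (the inner tuple of B's comprehension)
def pvNbrs (c : Int × Int) : List (Int × Int) :=
  [(c.1 - 1, c.2), (c.1 + 1, c.2), (c.1, c.2 - 1), (c.1, c.2 + 1)]

-- B's filter condition: in-grid, not yet seen, same value
def pvCond (grid : List (List Int)) (x y v : Int) (seen : PySem.Set (Int × Int))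
    (n : Int × Int) : Bool :=
  ((decide (0 ≤ n.1) && decide (n.1 < x)) && (decide (0 ≤ n.2) && decide (n.2 < y))) &&
    !(PySem.Set.contains seen n) && pvAt grid n.1 n.2 == v

-- next_layer(grid, x, y, v, layer, seen): comprehension, filter, dict.fromkeys dedup,
-- bulk seen.update; returns (nxt, updated seen)
def pvNextLayer (grid : List (List Int)) (x y v : Int) (layer : List (Int × Int))
    (seen : PySem.Set (Int × Int)) : List (Int × Int) × PySem.Set (Int × Int) :=
  let cand := layer.flatMap pvNbrs
  let nxt := PySem.List.dedup (cand.filter (fun n => pvCond grid x y v seen n))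
  (nxt, PySem.Set.update seen nxt)

-- the 'while layer:' loop; fuel only makes it total (each non-final level adds at least one
-- new cell, so x*y+1 iterations always suffice)
def pvBuildGo (grid : List (List Int)) (x y v : Int) :
    Nat → List (Int × Int) → List (Int × Int) → PySem.Set (Int × Int) →
    List (Int × Int) × PySem.Set (Int × Int)
  | 0, comp, _, seen => (comp, seen)
  | fuel + 1, comp, layer, seen =>
    if layer.isEmpty then (comp, seen)
    else
      let r := pvNextLayer grid x y v layer seen
      pvBuildGo grid x y v fuel (comp ++ r.1) r.1 r.2

def get_terraces_alt (grid : List (List Int)) (x : Int) (y : Int) : List (List (Int × Int)) :=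
  ((PySem.List.pyRange 0 x 1).foldl (fun st i =>
    (PySem.List.pyRange 0 y 1).foldl
      (fun (st : List (List (Int × Int)) × PySem.Set (Int × Int)) j =>
        if PySem.Set.contains st.2 (i, j) then st
        else
          let r := pvBuildGo grid x y (pvAt grid i j) (x.toNat * y.toNat + 1)
            [(i, j)] [(i, j)] (PySem.Set.add st.2 (i, j))
          (st.1 ++ [PySem.Set.ofList r.1], r.2)) st)
    ([], PySem.Set.empty)).1

-- ===== PRECONDITION & SPEC =====
-- Pre_ excludes exactly the inputs on which Python A raises IndexError: some cell of the
-- claimed x-by-y area lies outside the actual grid (fewer than x rows, or a row among the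
-- first x shorter than y).
def Pre_get_terraces (grid : List (List Int)) (x : Int) (y : Int) : Prop :=
  (0 < x ∧ 0 < y) → (x ≤ grid.length ∧ ∀ row ∈ grid.take x.toNat, y ≤ row.length)
instance (grid : List (List Int)) (x : Int) (y : Int) : Decidable (Pre_get_terraces grid x y) := by
  unfold Pre_get_terraces; infer_instance

def pvWitness_get_terraces : List (List Int) × Int × Int := ([[1, 1, 2], [1, 2, 2]], 2, 3)

def Spec_get_terraces (grid : List (List Int)) (x : Int) (y : Int) (out : List (List (Int × Int))) : Prop := out = get_terraces_alt grid x y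
instance (grid : List (List Int)) (x : Int) (y : Int) (out : List (List (Int × Int))) : Decidable (Spec_get_terraces grid x y out) := by unfold Spec_get_terraces; infer_instance

-- ===== CLAIM (what is proved, stated in full; the proofs are below) =====
def Claim_equal_get_terraces : Prop := ∀ (grid : List (List Int)) (x : Int) (y : Int), Dom_get_terraces grid x y → Pre_get_terraces grid x y → Spec_get_terraces grid x y (get_terraces grid x y)

-- ===== LEMMAS AND PROOFS =====

-- proof-side intermediate: A's deque BFS read as a FIFO queue over the discovery list
-- ('done' = popped cells in pop order, 'todo' = the pending queue, front first)
def pvFloodGo (grid : List (List Int)) (x y value : Int) :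
    Nat → List (Int × Int) → List (Int × Int) → PySem.Set (Int × Int) →
    List (Int × Int) × PySem.Set (Int × Int)
  | 0, done, _, seen => (done, seen)
  | fuel + 1, done, todo, seen =>
    match todo with
    | [] => (done, seen)
    | c :: rest =>
      let st := (pvNbrs c).foldl
        (fun (st : PySem.Set (Int × Int) × List (Int × Int)) nb =>
          if pvCond grid x y value st.1 nb
          then (PySem.Set.add st.1 nb, st.2 ++ [nb])
          else st) (seen, rest)
      pvFloodGo grid x y value fuel (done ++ [c]) st.2 st.1

-- proof-side: the sub-list of candidates a level keeps, threading the seen set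
def pvDFun (grid : List (List Int)) (x y v : Int) :
    PySem.Set (Int × Int) → List (Int × Int) → List (Int × Int)
  | _, [] => []
  | seen, n :: rest =>
    if pvCond grid x y v seen n then n :: pvDFun grid x y v (PySem.Set.add seen n) rest
    else pvDFun grid x y v seen rest

theorem pvContains_false {s : PySem.Set (Int × Int)} {a : Int × Int} (h : a ∉ s) :
    PySem.Set.contains s a = false := by
  cases hc : PySem.Set.contains s a with
  | false => rfl
  | true => exact absurd ((PySem.Set.contains_iff s a).1 hc) h

theorem pvContains_true {s : PySem.Set (Int × Int)} {a : Int × Int} (h : a ∈ s) :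
    PySem.Set.contains s a = true := (PySem.Set.contains_iff s a).2 h

theorem pvMem_update {s : PySem.Set (Int × Int)} {l : List (Int × Int)} {a : Int × Int} :
    a ∈ PySem.Set.update s l ↔ a ∈ s ∨ a ∈ l := by
  simp [PySem.Set.mem_update]

theorem pvMem_add {s : PySem.Set (Int × Int)} {a b : Int × Int} :
    b ∈ PySem.Set.add s a ↔ b ∈ s ∨ b = a := by
  simp [PySem.Set.mem_add]

theorem pvCond_false_of_contains (grid : List (List Int)) (x y v : Int)
    {seen : PySem.Set (Int × Int)} {n : Int × Int}
    (h : PySem.Set.contains seen n = true) : pvCond grid x y v seen n = false := by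
  unfold pvCond
  simp only [h, Bool.not_true, Bool.and_false, Bool.false_and]

-- the incremental accept-fold of a candidate list, in closed form via pvDFun
theorem pvFL (grid : List (List Int)) (x y v : Int) (cands : List (Int × Int)) :
    ∀ (seen : PySem.Set (Int × Int)) (out : List (Int × Int)),
    cands.foldl (fun (st : PySem.Set (Int × Int) × List (Int × Int)) nb =>
        if pvCond grid x y v st.1 nb then (PySem.Set.add st.1 nb, st.2 ++ [nb]) else st)
      (seen, out)
    = (PySem.Set.update seen (pvDFun grid x y v seen cands),
       out ++ pvDFun grid x y v seen cands) := by
  induction cands with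
  | nil => intro seen out; simp [pvDFun, PySem.Set.update]
  | cons n rest ih =>
    intro seen out
    simp only [List.foldl_cons, pvDFun]
    by_cases h : pvCond grid x y v seen n = true
    · simp only [h, if_true]
      rw [ih (PySem.Set.add seen n) (out ++ [n])]
      rw [PySem.Set.update_cons]
      simp
    · simp only [Bool.not_eq_true] at h
      simp only [h, Bool.false_eq_true, if_false]
      exact ih seen out

-- pvCond is antitone in the seen set
theorem pvCond_update_false (grid : List (List Int)) (x y v : Int)
    (seen : PySem.Set (Int × Int)) (l : List (Int × Int)) (n : Int × Int)
    (h : pvCond grid x y v seen n = false) :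
    pvCond grid x y v (PySem.Set.update seen l) n = false := by
  unfold pvCond at h ⊢
  cases hc : PySem.Set.contains seen n with
  | true =>
    have hmem : n ∈ seen := (PySem.Set.contains_iff seen n).1 hc
    exact pvCond_false_of_contains grid x y v (pvContains_true (pvMem_update.2 (Or.inl hmem)))
  | false =>
    rw [hc] at h
    simp only [Bool.not_false, Bool.and_true] at h
    cases hA : ((decide (0 ≤ n.1) && decide (n.1 < x)) && (decide (0 ≤ n.2) && decide (n.2 < y))) with
    | false => simp only [Bool.false_and]
    | true =>
      rw [hA] at h
      simp only [Bool.true_and] at h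
      simp [h]

-- filtering against the frozen seen set then ordered-dedup equals the threaded pvDFun
theorem pvG (grid : List (List Int)) (x y v : Int) (cands : List (Int × Int)) :
    ∀ (seen : PySem.Set (Int × Int)) (chosen : List (Int × Int)),
    List.foldl PySem.Set.add chosen (cands.filter (fun n => pvCond grid x y v seen n))
    = chosen ++ pvDFun grid x y v (PySem.Set.update seen chosen) cands := by
  induction cands with
  | nil => intro seen chosen; simp [pvDFun]
  | cons n rest ih =>
    intro seen chosen
    cases h : pvCond grid x y v seen n with
    | false =>
      simp only [List.filter_cons, h, Bool.false_eq_true, if_false]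
      rw [ih seen chosen]
      have hf : pvCond grid x y v (PySem.Set.update seen chosen) n = false :=
        pvCond_update_false grid x y v seen chosen n h
      simp [pvDFun, hf]
    | true =>
      simp only [List.filter_cons, h, if_true, List.foldl_cons]
      have h' := h
      unfold pvCond at h'
      simp only [Bool.and_eq_true, Bool.not_eq_true'] at h'
      obtain ⟨⟨hA, hc⟩, hV⟩ := h'
      by_cases hm : n ∈ chosen
      · have hadd : PySem.Set.add chosen n = chosen := by
          unfold PySem.Set.add
          simp only [pvContains_true hm, if_true]
        have hcond : pvCond grid x y v (PySem.Set.update seen chosen) n = false :=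
          pvCond_false_of_contains grid x y v (pvContains_true (pvMem_update.2 (Or.inr hm)))
        rw [hadd, ih seen chosen]
        simp [pvDFun, hcond]
      · have hadd : PySem.Set.add chosen n = chosen ++ [n] := by
          unfold PySem.Set.add
          simp only [pvContains_false hm, Bool.false_eq_true, if_false]
        have hcs : PySem.Set.contains (PySem.Set.update seen chosen) n = false := by
          apply pvContains_false
          intro hin
          rcases pvMem_update.1 hin with hin | hin
          · have hct := pvContains_true hin
            rw [hc] at hct
            exact Bool.noConfusion hct
          · exact hm hin
        have hcond : pvCond grid x y v (PySem.Set.update seen chosen) n = true := by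
          unfold pvCond
          simp only [hcs, Bool.not_false, Bool.and_true, Bool.and_eq_true]
          exact ⟨hA, hV⟩
        rw [hadd, ih seen (chosen ++ [n])]
        have hupd : PySem.Set.update seen (chosen ++ [n])
            = PySem.Set.add (PySem.Set.update seen chosen) n := by
          unfold PySem.Set.update
          rw [List.foldl_append]
          rfl
        simp [pvDFun, hcond, hupd]

-- pvDFun over an appended candidate list
theorem pvDFun_append (grid : List (List Int)) (x y v : Int) (l1 : List (Int × Int)) :
    ∀ (l2 : List (Int × Int)) (seen : PySem.Set (Int × Int)),
    pvDFun grid x y v seen (l1 ++ l2)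
    = pvDFun grid x y v seen l1
      ++ pvDFun grid x y v (PySem.Set.update seen (pvDFun grid x y v seen l1)) l2 := by
  induction l1 with
  | nil => intro l2 seen; simp [pvDFun, PySem.Set.update]
  | cons n rest ih =>
    intro l2 seen
    by_cases h : pvCond grid x y v seen n = true
    · simp only [List.cons_append, pvDFun, h, if_true]
      rw [ih l2 (PySem.Set.add seen n)]
      rw [PySem.Set.update_cons]
    · simp only [Bool.not_eq_true] at h
      simp only [List.cons_append, pvDFun, h, Bool.false_eq_true, if_false]
      exact ih l2 seen

-- the accepted cells are distinct, in-grid and new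
theorem pvDFun_spec (grid : List (List Int)) (x y v : Int) (cands : List (Int × Int)) :
    ∀ (seen : PySem.Set (Int × Int)),
    (pvDFun grid x y v seen cands).Nodup ∧
    ∀ n ∈ pvDFun grid x y v seen cands,
      (0 ≤ n.1 ∧ n.1 < x ∧ 0 ≤ n.2 ∧ n.2 < y) ∧ n ∉ seen := by
  induction cands with
  | nil => intro seen; exact ⟨List.nodup_nil, by simp [pvDFun]⟩
  | cons n rest ih =>
    intro seen
    by_cases h : pvCond grid x y v seen n = true
    · simp only [pvDFun, h, if_true]
      obtain ⟨hnd, hmem⟩ := ih (PySem.Set.add seen n)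
      have hbounds : (0 ≤ n.1 ∧ n.1 < x ∧ 0 ≤ n.2 ∧ n.2 < y) ∧ n ∉ seen := by
        unfold pvCond at h
        simp only [Bool.and_eq_true, Bool.not_eq_true', decide_eq_true_eq] at h
        refine ⟨⟨h.1.1.1.1, h.1.1.1.2, h.1.1.2.1, h.1.1.2.2⟩, ?_⟩
        intro hm
        have := pvContains_true hm
        rw [this] at h
        exact absurd h.1.2 (by simp)
      refine ⟨List.nodup_cons.2 ⟨?_, hnd⟩, ?_⟩
      · intro hm
        have := (hmem n hm).2
        exact this (pvMem_add.2 (Or.inr rfl))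
      · intro m hm
        rcases List.mem_cons.1 hm with rfl | hm
        · exact hbounds
        · obtain ⟨hb, hns⟩ := hmem m hm
          exact ⟨hb, fun hin => hns (pvMem_add.2 (Or.inl hin))⟩
    · simp only [Bool.not_eq_true] at h
      simp only [pvDFun, h, Bool.false_eq_true, if_false]
      exact ih seen

-- a duplicate-free list of in-grid cells has at most x*y elements
theorem pvCard (x y : Int) (l : List (Int × Int)) (hnd : l.Nodup)
    (hb_ : ∀ c ∈ l, 0 ≤ c.1 ∧ c.1 < x ∧ 0 ≤ c.2 ∧ c.2 < y) :
    l.length ≤ x.toNat * y.toNat := by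
  classical
  set f : Int × Int → Nat := fun c => c.1.toNat * y.toNat + c.2.toNat with hf
  have hinj : ∀ a ∈ l, ∀ b ∈ l, f a = f b → a = b := by
    intro a ha b hb hab
    obtain ⟨ha1, ha2, ha3, ha4⟩ := hb_ a ha
    obtain ⟨hb1, hb2, hb3, hb4⟩ := hb_ b hb
    have hy : (0:Int) < y := lt_of_le_of_lt ha3 ha4
    simp only [hf] at hab
    have ha4' : a.2.toNat < y.toNat := by omega
    have hb4' : b.2.toNat < y.toNat := by omega
    have key : a.1.toNat = b.1.toNat := by
      by_contra hne
      rcases Nat.lt_or_ge a.1.toNat b.1.toNat with hlt | hge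
      · have hstep : a.1.toNat * y.toNat + a.2.toNat < b.1.toNat * y.toNat + b.2.toNat := by
          calc a.1.toNat * y.toNat + a.2.toNat < a.1.toNat * y.toNat + y.toNat := by omega
            _ = (a.1.toNat + 1) * y.toNat := by ring
            _ ≤ b.1.toNat * y.toNat := Nat.mul_le_mul_right _ (by omega)
            _ ≤ b.1.toNat * y.toNat + b.2.toNat := Nat.le_add_right _ _
        omega
      · have hlt : b.1.toNat < a.1.toNat := by omega
        have hstep : b.1.toNat * y.toNat + b.2.toNat < a.1.toNat * y.toNat + a.2.toNat := by
          calc b.1.toNat * y.toNat + b.2.toNat < b.1.toNat * y.toNat + y.toNat := by omega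
            _ = (b.1.toNat + 1) * y.toNat := by ring
            _ ≤ a.1.toNat * y.toNat := Nat.mul_le_mul_right _ (by omega)
            _ ≤ a.1.toNat * y.toNat + a.2.toNat := Nat.le_add_right _ _
        omega
    have key2 : a.2.toNat = b.2.toNat := by
      rw [key] at hab
      omega
    have e1 : a.1 = b.1 := by omega
    have e2 : a.2 = b.2 := by omega
    exact Prod.ext e1 e2
  have hndm : (l.map f).Nodup := List.Nodup.map_on hinj hnd
  have hlt : ∀ m ∈ l.map f, m < x.toNat * y.toNat := by
    intro m hm
    obtain ⟨c, hc, rfl⟩ := List.mem_map.1 hm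
    obtain ⟨h1, h2, h3, h4⟩ := hb_ c hc
    have hy : (0:Int) < y := lt_of_le_of_lt h3 h4
    calc f c < c.1.toNat * y.toNat + y.toNat := by simp only [hf]; omega
      _ = (c.1.toNat + 1) * y.toNat := by ring
      _ ≤ x.toNat * y.toNat := Nat.mul_le_mul_right _ (by omega)
  have hsub : (l.map f).toFinset ⊆ Finset.range (x.toNat * y.toNat) := by
    intro m hm
    exact Finset.mem_range.2 (hlt m (List.mem_toFinset.1 hm))
  calc l.length = (l.map f).length := by simp
    _ = (l.map f).toFinset.card := (List.toFinset_card_of_nodup hndm).symm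
    _ ≤ (Finset.range (x.toNat * y.toNat)).card := Finset.card_le_card hsub
    _ = x.toNat * y.toNat := Finset.card_range _

-- A's neighbour loop conses accepted neighbours onto the frontier; the FIFO reading appends
-- them to the back of the queue: with the frontier kept as the reverse of the queue the two
-- folds agree.
theorem fold_rev (grid : List (List Int)) (x y value : Int) (ns : List (Int × Int)) :
    ∀ (s : PySem.Set (Int × Int)) (td : List (Int × Int)),
    ns.foldl (fun (st : PySem.Set (Int × Int) × List (Int × Int)) nb =>
        if pvCond grid x y value st.1 nb then (PySem.Set.add st.1 nb, nb :: st.2) else st)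
      (s, td.reverse)
    = ((ns.foldl (fun (st : PySem.Set (Int × Int) × List (Int × Int)) nb =>
          if pvCond grid x y value st.1 nb then (PySem.Set.add st.1 nb, st.2 ++ [nb]) else st)
        (s, td)).1,
       (ns.foldl (fun (st : PySem.Set (Int × Int) × List (Int × Int)) nb =>
          if pvCond grid x y value st.1 nb then (PySem.Set.add st.1 nb, st.2 ++ [nb]) else st)
        (s, td)).2.reverse) := by
  induction ns with
  | nil => intro s td; simp
  | cons nb ns ih =>
    intro s td
    simp only [List.foldl_cons]
    by_cases h : pvCond grid x y value s nb = true
    · simp only [h, if_true]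
      have : (nb :: td.reverse) = (td ++ [nb]).reverse := by simp
      rw [this]
      exact ih (PySem.Set.add s nb) (td ++ [nb])
    · simp only [Bool.not_eq_true] at h
      simp only [h, Bool.false_eq_true, if_false]
      exact ih s td

-- A's branch condition equals B's (A writes 'value == grid[...]', B 'grid[...] == value')
theorem cond_eq (grid : List (List Int)) (x y value : Int)
    (s : PySem.Set (Int × Int)) (nb : Int × Int) :
    (in_grid nb x y && !(PySem.Set.contains s nb) && value == pvAt grid nb.1 nb.2)
      = pvCond grid x y value s nb := by
  rw [in_grid, pvCond, BEq.comm]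

-- core correspondence: A's deque BFS (frontier = reverse of the pending queue, the terrace
-- set = the dequeued cells) computes the FIFO flood, whose discovery list stays Nodup
theorem go_corr (grid : List (List Int)) (x y value : Int) :
    ∀ (fuel : Nat) (done todo : List (Int × Int)) (seen : PySem.Set (Int × Int)),
    (done ++ todo).Nodup → (∀ c ∈ done ++ todo, c ∈ seen) →
    pvGetTerraceGo grid x y value fuel todo.reverse done seen
      = pvFloodGo grid x y value fuel done todo seen
    ∧ (pvFloodGo grid x y value fuel done todo seen).1.Nodup := by
  intro fuel
  induction fuel with
  | zero => intro done todo seen hnd _; exact ⟨rfl, hnd.of_append_left⟩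
  | succ fuel ih =>
    intro done todo seen hnd hmem
    cases todo with
    | nil => exact ⟨rfl, hnd.of_append_left⟩
    | cons c rest =>
      have hcnotdone : c ∉ done := by
        have hdj := List.disjoint_of_nodup_append hnd
        exact fun h => hdj h (List.mem_cons_self)
      have hfl := pvFL grid x y value (pvNbrs c) seen rest
      obtain ⟨hdnd, hdspec⟩ := pvDFun_spec grid x y value (pvNbrs c) seen
      have hshape : (done ++ [c]) ++ (rest ++ pvDFun grid x y value seen (pvNbrs c))
          = (done ++ c :: rest) ++ pvDFun grid x y value seen (pvNbrs c) := by simp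
      have hnd' : ((done ++ [c]) ++ (rest ++ pvDFun grid x y value seen (pvNbrs c))).Nodup := by
        rw [hshape, List.nodup_append]
        refine ⟨hnd, hdnd, ?_⟩
        intro a ha b hb
        exact fun heq => ((hdspec b hb).2) (heq ▸ hmem a ha)
      have hmem' : ∀ a ∈ (done ++ [c]) ++ (rest ++ pvDFun grid x y value seen (pvNbrs c)),
          a ∈ PySem.Set.update seen (pvDFun grid x y value seen (pvNbrs c)) := by
        intro a ha
        rw [hshape, List.mem_append] at ha
        rcases ha with ha | ha
        · exact pvMem_update.2 (Or.inl (hmem a ha))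
        · exact pvMem_update.2 (Or.inr ha)
      obtain ⟨ihEq, ihNd⟩ := ih (done ++ [c]) (rest ++ pvDFun grid x y value seen (pvNbrs c))
        (PySem.Set.update seen (pvDFun grid x y value seen (pvNbrs c))) hnd' hmem'
      constructor
      · show pvGetTerraceGo grid x y value (fuel + 1) (c :: rest).reverse done seen = _
        rw [pvGetTerraceGo]
        rw [List.getLast?_reverse]
        simp only [List.head?_cons]
        have hdl : (c :: rest).reverse.dropLast = rest.reverse := by
          rw [List.reverse_cons, List.dropLast_concat]
        have hfn : (fun (st : PySem.Set (Int × Int) × List (Int × Int)) nb =>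
            if in_grid nb x y && !(PySem.Set.contains st.1 nb) && value == pvAt grid nb.1 nb.2
            then (PySem.Set.add st.1 nb, nb :: st.2) else st)
          = (fun (st : PySem.Set (Int × Int) × List (Int × Int)) nb =>
            if pvCond grid x y value st.1 nb
            then (PySem.Set.add st.1 nb, nb :: st.2) else st) := by
          funext st nb; rw [cond_eq]
        rw [hdl, hfn]
        rw [show [(c.1 - 1, c.2), (c.1 + 1, c.2), (c.1, c.2 - 1), (c.1, c.2 + 1)] = pvNbrs c from rfl]
        rw [fold_rev grid x y value (pvNbrs c) seen rest]
        rw [PySem.Set.add_of_not_mem hcnotdone]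
        rw [hfl]
        rw [ihEq]
        conv_rhs => rw [pvFloodGo]
        rw [hfl]
      · conv => rw [pvFloodGo]; rw [hfl]
        exact ihNd

-- a whole level of the FIFO flood at once: processing 'layer' appends exactly the accepted
-- candidates of the level and bulk-updates the seen set
theorem layer_adv (grid : List (List Int)) (x y v : Int) (layer : List (Int × Int)) :
    ∀ (f : Nat) (done nxt0 : List (Int × Int)) (seen : PySem.Set (Int × Int)),
    pvFloodGo grid x y v (layer.length + f) done (layer ++ nxt0) seen
    = pvFloodGo grid x y v f (done ++ layer)
        (nxt0 ++ pvDFun grid x y v seen (layer.flatMap pvNbrs))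
        (PySem.Set.update seen (pvDFun grid x y v seen (layer.flatMap pvNbrs))) := by
  induction layer with
  | nil =>
    intro f done nxt0 seen
    simp [pvDFun, PySem.Set.update]
  | cons c rest ih =>
    intro f done nxt0 seen
    rw [show (c :: rest).length + f = (rest.length + f) + 1 from by simp [List.length_cons]; omega]
    simp only [List.cons_append]
    rw [pvFloodGo]
    rw [pvFL grid x y v (pvNbrs c) seen (rest ++ nxt0)]
    simp only [List.append_assoc]
    rw [ih f (done ++ [c]) (nxt0 ++ pvDFun grid x y v seen (pvNbrs c))
      (PySem.Set.update seen (pvDFun grid x y v seen (pvNbrs c)))]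
    rw [List.flatMap_cons]
    rw [pvDFun_append grid x y v (pvNbrs c) (rest.flatMap pvNbrs) seen]
    rw [PySem.Set.update_append]
    simp [List.append_assoc]

-- the FIFO flood equals B's level loop
theorem flood_build (grid : List (List Int)) (x y v : Int) :
    ∀ (g f : Nat) (done layer : List (Int × Int)) (seen : PySem.Set (Int × Int)),
    (done ++ layer).Nodup →
    (∀ c ∈ done ++ layer, 0 ≤ c.1 ∧ c.1 < x ∧ 0 ≤ c.2 ∧ c.2 < y) →
    (∀ c ∈ done ++ layer, c ∈ seen) →
    x.toNat * y.toNat ≤ done.length + f →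
    x.toNat * y.toNat + 1 ≤ done.length + g →
    pvFloodGo grid x y v f done layer seen
      = pvBuildGo grid x y v g (done ++ layer) layer seen := by
  intro g
  induction g with
  | zero =>
    intro f done layer seen hnd hb hm hf hg
    exfalso
    have hcd := pvCard x y done hnd.of_append_left
      (fun c hc => hb c (List.mem_append.2 (Or.inl hc)))
    omega
  | succ g ih =>
    intro f done layer seen hnd hb hm hf hg
    cases layer with
    | nil =>
      cases f with
      | zero => simp [pvFloodGo, pvBuildGo]
      | succ f => simp [pvFloodGo, pvBuildGo]
    | cons c rest =>
      have hcard := pvCard x y (done ++ c :: rest) hnd hb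
      have hlay : (c :: rest).length ≤ f := by
        rw [List.length_append] at hcard
        simp only [List.length_cons] at hcard ⊢
        omega
      have hadv := layer_adv grid x y v (c :: rest) (f - (c :: rest).length) done [] seen
      rw [List.append_nil] at hadv
      rw [List.nil_append] at hadv
      rw [show (c :: rest).length + (f - (c :: rest).length) = f from by omega] at hadv
      rw [hadv]
      conv_rhs => rw [pvBuildGo]
      simp only [List.isEmpty_cons, Bool.false_eq_true, if_false]
      have hded : PySem.List.dedup (((c :: rest).flatMap pvNbrs).filter
            (fun n => pvCond grid x y v seen n))
          = pvDFun grid x y v seen ((c :: rest).flatMap pvNbrs) := by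
        rw [PySem.List.dedup_eq_ofList, PySem.Set.ofList_eq_foldl]
        have hg0 := pvG grid x y v ((c :: rest).flatMap pvNbrs) seen []
        simpa [PySem.Set.update] using hg0
      have hnl : pvNextLayer grid x y v (c :: rest) seen
          = (pvDFun grid x y v seen ((c :: rest).flatMap pvNbrs),
             PySem.Set.update seen (pvDFun grid x y v seen ((c :: rest).flatMap pvNbrs))) := by
        simp only [pvNextLayer]
        rw [hded]
      rw [hnl]
      obtain ⟨hdnd, hdsp⟩ := pvDFun_spec grid x y v ((c :: rest).flatMap pvNbrs) seen
      have hnd2 : ((done ++ c :: rest) ++ pvDFun grid x y v seen ((c :: rest).flatMap pvNbrs)).Nodup := by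
        rw [List.nodup_append]
        refine ⟨hnd, hdnd, ?_⟩
        intro a ha b hb2
        exact fun heq => ((hdsp b hb2).2) (heq ▸ hm a ha)
      have hb2 : ∀ a ∈ (done ++ c :: rest) ++ pvDFun grid x y v seen ((c :: rest).flatMap pvNbrs),
          0 ≤ a.1 ∧ a.1 < x ∧ 0 ≤ a.2 ∧ a.2 < y := by
        intro a ha
        rcases List.mem_append.1 ha with ha | ha
        · exact hb a ha
        · exact (hdsp a ha).1
      have hm2 : ∀ a ∈ (done ++ c :: rest) ++ pvDFun grid x y v seen ((c :: rest).flatMap pvNbrs),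
          a ∈ PySem.Set.update seen (pvDFun grid x y v seen ((c :: rest).flatMap pvNbrs)) := by
        intro a ha
        rcases List.mem_append.1 ha with ha | ha
        · exact pvMem_update.2 (Or.inl (hm a ha))
        · exact pvMem_update.2 (Or.inr ha)
      have hlen2 : (done ++ c :: rest).length = done.length + (c :: rest).length :=
        List.length_append
      exact ih (f - (c :: rest).length) (done ++ c :: rest)
        (pvDFun grid x y v seen ((c :: rest).flatMap pvNbrs))
        (PySem.Set.update seen (pvDFun grid x y v seen ((c :: rest).flatMap pvNbrs)))
        hnd2 hb2 hm2
        (by simp only [List.length_append, List.length_cons] at *; omega)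
        (by simp only [List.length_append, List.length_cons] at *; omega)

-- one cell of the outer double loop: A's step equals B's step on every state
theorem cell_eq (grid : List (List Int)) (x y : Int) (i j : Int)
    (hi0 : 0 ≤ i) (hix : i < x) (hj0 : 0 ≤ j) (hjy : j < y)
    (st : List (List (Int × Int)) × PySem.Set (Int × Int)) :
    (if PySem.Set.contains st.2 (i, j) then st
     else
       let r := pvGetTerrace grid x y (i, j) st.2
       (st.1 ++ [r.1], r.2))
    = (if PySem.Set.contains st.2 (i, j) then st
       else
         let r := pvBuildGo grid x y (pvAt grid i j) (x.toNat * y.toNat + 1)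
           [(i, j)] [(i, j)] (PySem.Set.add st.2 (i, j))
         (st.1 ++ [PySem.Set.ofList r.1], r.2)) := by
  by_cases hc : PySem.Set.contains st.2 (i, j) = true
  · simp only [hc, if_true]
  · simp only [Bool.not_eq_true] at hc
    simp only [hc, Bool.false_eq_true, if_false]
    have h1 : (([] : List (Int × Int)) ++ [(i, j)]).Nodup := by simp
    have h2 : ∀ a ∈ ([] : List (Int × Int)) ++ [(i, j)], a ∈ PySem.Set.add st.2 (i, j) := by
      intro a ha
      simp only [List.nil_append, List.mem_singleton] at ha
      subst ha
      exact pvMem_add.2 (Or.inr rfl)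
    obtain ⟨hEq, hNd⟩ := go_corr grid x y (pvAt grid (i, j).1 (i, j).2)
      (x.toNat * y.toNat + 1) [] [(i, j)] (PySem.Set.add st.2 (i, j)) h1 h2
    simp only [List.reverse_cons, List.reverse_nil, List.nil_append] at hEq
    have hb : ∀ c ∈ ([] : List (Int × Int)) ++ [(i, j)],
        0 ≤ c.1 ∧ c.1 < x ∧ 0 ≤ c.2 ∧ c.2 < y := by
      intro c hcm
      simp only [List.nil_append, List.mem_singleton] at hcm
      subst hcm
      exact ⟨hi0, hix, hj0, hjy⟩
    have hfb := flood_build grid x y (pvAt grid (i, j).1 (i, j).2)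
      (x.toNat * y.toNat + 1) (x.toNat * y.toNat + 1) [] [(i, j)]
      (PySem.Set.add st.2 (i, j)) h1 hb h2 (by simp) (by simp)
    rw [List.nil_append] at hfb
    rw [hfb] at hNd
    show (st.1 ++ [(pvGetTerrace grid x y (i, j) st.2).1], (pvGetTerrace grid x y (i, j) st.2).2) = _
    unfold pvGetTerrace
    rw [show (PySem.Set.empty : PySem.Set (Int × Int)) = [] from rfl]
    rw [hEq, hfb]
    rw [PySem.Set.ofList_eq_self_of_nodup _ hNd]

theorem ports_eq (grid : List (List Int)) (x y : Int) :
    get_terraces grid x y = get_terraces_alt grid x y := by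
  unfold get_terraces get_terraces_alt
  congr 1
  apply PySem.List.foldl_congr_mem
  intro st i hi
  apply PySem.List.foldl_congr_mem
  intro st' j hj
  rw [PySem.List.mem_pyRange_one] at hi hj
  exact cell_eq grid x y i j hi.1 hi.2 hj.1 hj.2 st'

-- ===== VERDICT (by name: the statement is the Claim_ definition above) =====
theorem get_terraces_spec : Claim_equal_get_terraces := by
  intro grid x y _ _
  unfold Spec_get_terraces
  exact ports_eq grid x y
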